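-- pv_equiv track=rewrite | github.com/SachinRatnam/HackerRank | Problem Solving/Jumping on the Clouds: Revisited/code1.py | jumpingOnClouds
-- ===== SOURCE A (Python) =====
-- def jumpingOnClouds(c, k):
--     e=100
--     pos=0
--     n=len(c)
--     while True:
--         pos=(pos+k)%n
--         if c[pos]==1:
--             e-=3
--         else:
--             e-=1
--
--         if pos==0:
--             break
--     return e
-- ===== SOURCE B (Python) =====
-- def jumpingOnClouds(c, k):
--     # closed form: the walk visits exactly the multiples of g = gcd(n, k),
--     # n//g clouds in total, each costing 1 plus 2 more if it is a thundercloud.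
--     n = len(c)
--     a, b = n, abs(k)
--     while b:
--         a, b = b, a % b
--     g = a
--     thunder = 0
--     for j in range(0, n, g):
--         if c[j] == 1:
--             thunder += 1
--     return 100 - n // g - 2 * thunder
-- ===== Notes on version B (the rewrite author's own statement) =====
-- stated objective: faster
-- what changed: Replaces A's step-by-step simulation of the cyclic walk with a closed form: the walk lands exactly once on each multiple of g = gcd(len(c), k), so B computes g with one Euclid loop and counts thunderclouds over range(0, len(c), g), returning 100 - len(c)//g - 2*thunder.
import Mathlib
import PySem

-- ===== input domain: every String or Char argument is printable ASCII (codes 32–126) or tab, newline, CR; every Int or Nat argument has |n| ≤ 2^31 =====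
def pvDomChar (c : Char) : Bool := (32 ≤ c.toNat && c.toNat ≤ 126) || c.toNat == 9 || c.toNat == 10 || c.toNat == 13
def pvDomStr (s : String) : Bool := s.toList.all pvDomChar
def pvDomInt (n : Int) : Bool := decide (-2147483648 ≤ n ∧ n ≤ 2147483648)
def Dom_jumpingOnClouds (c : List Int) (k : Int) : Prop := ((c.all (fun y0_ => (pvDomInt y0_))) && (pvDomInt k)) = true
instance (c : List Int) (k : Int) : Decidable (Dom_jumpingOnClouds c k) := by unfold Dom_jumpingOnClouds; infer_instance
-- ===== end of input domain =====

-- B replaces A's step-by-step walk with a closed form: the walk lands exactly on the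
-- multiples of gcd(len(c), k), so B counts those directly (objective: faster on long walks).

-- ===== PORT A =====
-- The while loop of A; fuel bounds the iteration count (the loop runs exactly
-- len(c)/gcd(len(c),k) ≤ len(c) times on every input Pre_ admits, so fuel never runs out
-- there).  c[pos] is pyGetD with default 0: inside Pre_ the index (pos+k) % n is always
-- in range, so the default is never read where A returns.
def loopA (c : List Int) (k n : Int) : Nat → Int → Int → Int
  | 0, _, e => e
  | fuel+1, pos, e =>
      let pos' := PySem.Int.mod (pos + k) n
      let e' := if PySem.List.pyGetD c pos' 0 == 1 then e - 3 else e - 1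
      if pos' == 0 then e' else loopA c k n fuel pos' e'

def jumpingOnClouds (c : List Int) (k : Int) : Int :=
  loopA c k (c.length : Int) (c.length + 1) 0 100

-- ===== PORT B =====
-- Source B's hand-written Euclid loop `while b: a, b = b, a % b`; the second argument
-- strictly decreases, so fuel = initial b makes the same loop structurally recursive
-- (the fuel-0/b>0 case is never reached).
def euclidGo : Nat → Nat → Nat → Nat
  | 0, a, _ => a
  | _+1, a, 0 => a
  | fuel+1, a, b+1 => euclidGo fuel (b+1) (a % (b+1))

def euclidLoop (a b : Nat) : Nat := euclidGo b a b

def jumpingOnClouds_alt (c : List Int) (k : Int) : Int :=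
  let n : Int := c.length
  let g : Int := (euclidLoop c.length k.natAbs : Nat)
  let thunder : Int :=
    (PySem.List.pyRange 0 n g).foldl
      (fun acc j => if PySem.List.pyGetD c j 0 == 1 then acc + 1 else acc) 0
  100 - PySem.Int.floordiv n g - 2 * thunder

-- ===== PRECONDITION & SPEC =====
-- Pre_ excludes only the empty list, on which A raises ZeroDivisionError ((pos+k) % 0).
def Pre_jumpingOnClouds (c : List Int) (k : Int) : Prop := c ≠ []
instance (c : List Int) (k : Int) : Decidable (Pre_jumpingOnClouds c k) := by
  unfold Pre_jumpingOnClouds; infer_instance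

def pvWitness_jumpingOnClouds : List Int × Int := ([0, 1, 0], 2)

def Spec_jumpingOnClouds (c : List Int) (k : Int) (out : Int) : Prop := out = jumpingOnClouds_alt c k
instance (c : List Int) (k : Int) (out : Int) : Decidable (Spec_jumpingOnClouds c k out) := by unfold Spec_jumpingOnClouds; infer_instance

-- ===== CLAIM (what is proved, stated in full; the proofs are below) =====
def Claim_equal_jumpingOnClouds : Prop := ∀ (c : List Int) (k : Int), Dom_jumpingOnClouds c k → Pre_jumpingOnClouds c k → Spec_jumpingOnClouds c k (jumpingOnClouds c k)

-- ===== LEMMAS AND PROOFS =====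

-- the per-cloud cost of landing on position x
def pvCost (c : List Int) (x : Nat) : Int :=
  if PySem.List.pyGetD c (x : Int) 0 == 1 then 3 else 1

-- euclidLoop is Euclid's gcd
theorem euclidGo_eq_gcd : ∀ (fuel a b : Nat), b ≤ fuel → euclidGo fuel a b = Nat.gcd b a := by
  intro fuel
  induction fuel with
  | zero => intro a b hb; interval_cases b; simp [euclidGo]
  | succ f ih =>
      intro a b hb
      match b with
      | 0 => simp [euclidGo]
      | b+1 =>
          rw [euclidGo, ih (b+1) (a % (b+1)) (by
            have : a % (b+1) < b+1 := Nat.mod_lt a (by omega); omega)]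
          exact (Nat.gcd_rec (b+1) a).symm

theorem euclidLoop_eq_gcd (a b : Nat) : euclidLoop a b = Nat.gcd b a :=
  euclidGo_eq_gcd b a b le_rfl

-- n ∣ i*K ↔ (n/gcd n K) ∣ i  (n > 0)
theorem dvd_mul_iff_div_gcd_dvd (n K i : Nat) (hn : 0 < n) :
    n ∣ i * K ↔ (n / Nat.gcd n K) ∣ i := by
  set g := Nat.gcd n K with hgd
  have hg : 0 < g := Nat.gcd_pos_of_pos_left K hn
  obtain ⟨m', hm'⟩ := Nat.gcd_dvd_left n K
  obtain ⟨K', hK'⟩ := Nat.gcd_dvd_right n K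
  have hmdef : n / g = m' := by rw [hm']; exact Nat.mul_div_cancel_left _ hg
  have hKdef : K / g = K' := by rw [hK']; exact Nat.mul_div_cancel_left _ hg
  have hco : m'.Coprime K' := by
    have := Nat.coprime_div_gcd_div_gcd (m := n) (n := K) hg
    rwa [← hgd, hmdef, hKdef] at this
  rw [hmdef]
  constructor
  · intro h
    have h2 : g * m' ∣ g * (i * K') := by
      rw [show g * (i * K') = i * K from by rw [hK']; ring, ← hm']
      exact h
    exact hco.dvd_of_dvd_mul_right ((Nat.mul_dvd_mul_iff_left hg).mp h2)
  · intro h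
    obtain ⟨d, hd⟩ := h
    refine ⟨d * K', ?_⟩
    conv_rhs => rw [hm']
    rw [hd]
    conv_lhs => rw [hK']
    ring

-- the loop, started at position (j*K) % n with m - j steps to go
theorem loopA_eval (c : List Int) (k : Int) (K m : Nat)
    (hn : 0 < c.length)
    (hK : (K : Int) = k % (c.length : Int))
    (hm : m = c.length / Nat.gcd c.length K) :
    ∀ (t j : Nat) (e : Int) (fuel : Nat), j + t = m → 0 < t → t ≤ fuel →
      loopA c k (c.length : Int) fuel (((j * K) % c.length : Nat) : Int) e
        = e - ∑ i ∈ Finset.Ico j m, pvCost c ((i+1) * K % c.length) := by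
  have hnI : (0 : Int) < (c.length : Int) := by exact_mod_cast hn
  have step : ∀ j : Nat,
      PySem.Int.mod ((((j * K) % c.length : Nat) : Int) + k) (c.length : Int)
        = (((j+1) * K % c.length : Nat) : Int) := by
    intro j
    rw [PySem.Int.mod_eq_emod_of_pos hnI]
    push_cast
    rw [Int.emod_add_emod, Int.add_emod ((j : Int) * K) k, ← hK, Int.emod_add_emod]
    congr 1
    ring
  have zero_iff : ∀ i : Nat, (i * K % c.length = 0) ↔ m ∣ i := by
    intro i
    rw [hm, ← dvd_mul_iff_div_gcd_dvd c.length K i hn]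
    exact Iff.symm Nat.dvd_iff_mod_eq_zero
  have esub : ∀ (e : Int) (x : Nat),
      (if PySem.List.pyGetD c ((x : Nat) : Int) 0 == 1 then e - 3 else e - 1)
        = e - pvCost c x := by
    intro e x
    simp only [pvCost, beq_iff_eq]
    split_ifs <;> ring
  intro t
  induction t with
  | zero => intro j e fuel h0 h1; omega
  | succ t ih =>
    intro j e fuel hjt ht hf
    obtain ⟨f, rfl⟩ : ∃ f, fuel = f + 1 := ⟨fuel - 1, by omega⟩
    rw [loopA]
    rw [step j]
    cases t with
    | zero =>
      have hz : (j+1) * K % c.length = 0 := (zero_iff (j+1)).mpr ⟨1, by omega⟩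
      rw [hz]
      have hIco : Finset.Ico j m = {j} := by
        have : m = j + 1 := by omega
        rw [this, Nat.Ico_succ_singleton]
      simp only [Nat.cast_zero, beq_self_eq_true, if_true, hIco, Finset.sum_singleton, hz]
      have := esub e 0
      simpa using this
    | succ t' =>
      have hnz : (j+1) * K % c.length ≠ 0 := by
        intro h
        have hd := (zero_iff (j+1)).mp h
        have := Nat.le_of_dvd (by omega) hd
        omega
      have hcond : ((((j+1) * K % c.length : Nat) : Int) == 0) = false := by
        simpa using Int.natCast_ne_zero.mpr hnz
      rw [hcond]
      simp only [Bool.false_eq_true, if_false]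
      rw [esub e ((j+1) * K % c.length)]
      rw [ih (j+1) (e - pvCost c ((j+1) * K % c.length)) f (by omega) (by omega) (by omega)]
      rw [Finset.sum_eq_sum_Ico_succ_bot (show j < m by omega)]
      ring

-- the multiset of visited positions is the multiples of g
theorem sum_visited_eq (c : List Int) (K m g : Nat) (hn : 0 < c.length)
    (hg : g = Nat.gcd c.length K) (hm : m = c.length / g) :
    ∑ i ∈ Finset.range m, pvCost c ((i+1) * K % c.length)
      = ∑ j ∈ Finset.range m, pvCost c (j * g) := by
  have hgpos : 0 < g := hg ▸ Nat.gcd_pos_of_pos_left K hn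
  have hgn : g ∣ c.length := hg ▸ Nat.gcd_dvd_left c.length K
  have hgK : g ∣ K := hg ▸ Nat.gcd_dvd_right c.length K
  have hgm : g * m = c.length := by rw [hm]; exact Nat.mul_div_cancel' hgn
  have hdvd_iff : ∀ i, c.length ∣ i * K ↔ m ∣ i := by
    intro i; rw [hm, hg]; exact dvd_mul_iff_div_gcd_dvd c.length K i hn
  have key : ∀ i j : Nat, j < m → i ≤ j →
      (i+1) * K % c.length = (j+1) * K % c.length → i = j := by
    intro i j hj hle hij
    have hmod : Nat.ModEq c.length ((i+1) * K) ((j+1) * K) := hij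
    have hle' : (i+1) * K ≤ (j+1) * K := Nat.mul_le_mul_right K (by omega)
    have hsub : c.length ∣ (j+1) * K - (i+1) * K := (Nat.modEq_iff_dvd' hle').mp hmod
    have h3 : (j - i) * K = (j+1) * K - (i+1) * K := by
      rw [← Nat.sub_mul]; congr 1; omega
    have hmd : m ∣ j - i := (hdvd_iff (j - i)).mp (h3 ▸ hsub)
    by_cases heq : i = j
    · exact heq
    · have hpos : 0 < j - i := by omega
      have := Nat.le_of_dvd hpos hmd
      omega
  have hinj : Set.InjOn (fun i => (i+1) * K % c.length) (Finset.range m) := by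
    intro i hi j hj hij
    simp only [Finset.coe_range, Set.mem_Iio] at hi hj
    simp only at hij
    rcases Nat.le_total i j with h | h
    · exact key i j hj h hij
    · exact (key j i hi h hij.symm).symm
  have hinjG : Set.InjOn (fun j => j * g) (Finset.range m) := by
    intro a _ b _ h
    exact Nat.eq_of_mul_eq_mul_right hgpos h
  have hmem : ∀ i ∈ Finset.range m,
      (i+1) * K % c.length ∈ Finset.image (fun j => j * g) (Finset.range m) := by
    intro i _
    have hdv : g ∣ (i+1) * K % c.length :=
      (Nat.dvd_mod_iff hgn).mpr (Dvd.dvd.mul_left hgK _)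
    have hlt : (i+1) * K % c.length < c.length := Nat.mod_lt _ hn
    obtain ⟨q, hq⟩ := hdv
    have hqm : q < m := by
      have h2 : g * q < g * m := by rw [hgm, ← hq]; exact hlt
      exact Nat.lt_of_mul_lt_mul_left h2
    refine Finset.mem_image.mpr ⟨q, Finset.mem_range.mpr hqm, ?_⟩
    rw [Nat.mul_comm]; exact hq.symm
  have hTM : Finset.image (fun i => (i+1) * K % c.length) (Finset.range m)
      = Finset.image (fun j => j * g) (Finset.range m) := by
    apply Finset.eq_of_subset_of_card_le
    · intro x hx
      obtain ⟨i, hi, rfl⟩ := Finset.mem_image.mp hx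
      exact hmem i hi
    · rw [Finset.card_image_of_injOn hinj, Finset.card_image_of_injOn hinjG]
  rw [← Finset.sum_image hinj, hTM, Finset.sum_image hinjG]

-- a counting foldl over List.range is a 0/1 Finset sum
theorem foldl_range_count (Q : Nat → Bool) : ∀ (m : Nat) (a : Int),
    (List.range m).foldl (fun acc i => if Q i then acc + 1 else acc) a
      = a + ∑ i ∈ Finset.range m, (if Q i then (1:Int) else 0) := by
  intro m
  induction m with
  | zero => intro a; simp
  | succ m ih =>
      intro a
      rw [List.range_succ, List.foldl_append]
      simp only [List.foldl]
      rw [ih, Finset.sum_range_succ]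
      split_ifs <;> ring

-- B evaluates to the closed form
theorem alt_eval (c : List Int) (k : Int) (g m : Nat) (hn : 0 < c.length)
    (hg : g = Nat.gcd c.length k.natAbs) (hm : m = c.length / g) :
    jumpingOnClouds_alt c k = 100 - ∑ j ∈ Finset.range m, pvCost c (j * g) := by
  have hgpos : 0 < g := hg ▸ Nat.gcd_pos_of_pos_left _ hn
  have hgn : g ∣ c.length := hg ▸ Nat.gcd_dvd_left _ _
  have hgm : g * m = c.length := by rw [hm]; exact Nat.mul_div_cancel' hgn
  have hgI : (0:Int) < (g:Int) := by exact_mod_cast hgpos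
  have hE : euclidLoop c.length k.natAbs = g := by
    rw [euclidLoop_eq_gcd, Nat.gcd_comm, ← hg]
  have hnm : (c.length : Int) = (g:Int) * (m:Int) := by exact_mod_cast hgm.symm
  have hlen : ((c.length:Int) - 0 + g - 1) / g = (m:Int) := by
    have h1 : ((c.length:Int) - 0 + g - 1) = ((g:Int) - 1) + (g:Int) * m := by
      rw [hnm]; ring
    rw [h1, Int.add_mul_ediv_left _ _ (by omega : (g:Int) ≠ 0),
      Int.ediv_eq_zero_of_lt (by omega) (by omega)]
    ring
  have hrange : PySem.List.pyRange 0 (c.length:Int) (g:Int)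
      = (List.range m).map (fun i => (0:Int) + (g:Int) * (i:Nat)) := by
    rw [PySem.List.pyRange_of_pos _ _ hgI]
    have hif : (if (0:Int) < (c.length:Int) then (((c.length:Int) - 0 + g - 1)/g).toNat else 0) = m := by
      rw [if_pos (by exact_mod_cast hn), hlen]
      exact Int.toNat_natCast m
    rw [hif]
  have hfd : PySem.Int.floordiv (c.length : Int) (g : Int) = (m : Int) := by
    rw [PySem.Int.floordiv_eq_ediv_of_pos hgI, hnm,
      Int.mul_ediv_cancel_left _ (by omega : (g:Int) ≠ 0)]
  have hcost : ∀ j : Nat, pvCost c (j * g)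
      = 1 + 2 * (if (PySem.List.pyGetD c ((0:Int) + (g:Int) * (j:Nat)) 0 == 1) then (1:Int) else 0) := by
    intro j
    have hc : ((j * g : Nat) : Int) = (0:Int) + (g:Int) * (j:Nat) := by push_cast; ring
    unfold pvCost
    rw [hc]
    split_ifs <;> ring
  simp only [jumpingOnClouds_alt, hE, hrange, List.foldl_map, hfd]
  rw [foldl_range_count (fun i => PySem.List.pyGetD c ((0:Int) + (g:Int) * (i:Nat)) 0 == 1) m 0]
  rw [Finset.sum_congr rfl (fun j _ => hcost j), Finset.sum_add_distrib, ← Finset.mul_sum,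
    Finset.sum_const, Finset.card_range]
  push_cast
  ring

-- ===== VERDICT (by name: the statement is the Claim_ definition above) =====
theorem jumpingOnClouds_spec : Claim_equal_jumpingOnClouds := by
  intro c k _ hpre
  unfold Spec_jumpingOnClouds
  have hne : c ≠ [] := hpre
  have hn : 0 < c.length := List.length_pos_iff.mpr hne
  have hnI : (0 : Int) < (c.length : Int) := by exact_mod_cast hn
  have hK : (((k % (c.length : Int)).toNat : Nat) : Int) = k % (c.length : Int) :=
    Int.toNat_of_nonneg (Int.emod_nonneg k (by omega))
  have hgg : Nat.gcd c.length (k % (c.length : Int)).toNat = Nat.gcd c.length k.natAbs := by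
    have h1 : Int.gcd (c.length : Int) (k % (c.length : Int)) = Int.gcd (c.length : Int) k := by
      rw [Int.emod_def,
        show k - (c.length : Int) * (k / (c.length : Int))
          = k + (-(k / (c.length : Int))) * (c.length : Int) from by ring]
      exact Int.gcd_add_mul_right_right (c.length : Int) k (-(k / (c.length : Int)))
    rw [← hK, Int.gcd_natCast_natCast] at h1
    rw [h1]
    simp [Int.gcd]
  have hgn : Nat.gcd c.length k.natAbs ∣ c.length := Nat.gcd_dvd_left _ _
  have hgpos : 0 < Nat.gcd c.length k.natAbs := Nat.gcd_pos_of_pos_left _ hn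
  have hmpos : 0 < c.length / Nat.gcd c.length k.natAbs :=
    Nat.div_pos (Nat.le_of_dvd hn hgn) hgpos
  have hmle : c.length / Nat.gcd c.length k.natAbs ≤ c.length + 1 :=
    le_trans (Nat.div_le_self _ _) (by omega)
  have hmain := loopA_eval c k (k % (c.length : Int)).toNat
    (c.length / Nat.gcd c.length k.natAbs) hn hK (by rw [hgg])
    (c.length / Nat.gcd c.length k.natAbs) 0 100 (c.length + 1)
    (by omega) hmpos hmle
  simp only [Nat.zero_mul, Nat.zero_mod, Nat.cast_zero] at hmain
  rw [jumpingOnClouds, hmain, ← Finset.range_eq_Ico,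
    sum_visited_eq c (k % (c.length : Int)).toNat
      (c.length / Nat.gcd c.length k.natAbs) (Nat.gcd c.length k.natAbs) hn hgg.symm rfl,
    alt_eval c k (Nat.gcd c.length k.natAbs)
      (c.length / Nat.gcd c.length k.natAbs) hn rfl rfl]
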